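-- pv_equiv track=rewrite | github.com/pedrohenrique497096-boop/ia-trading | app.py | classify_trend
-- ===== SOURCE A (Python) =====
-- def classify_trend(results):
--     htf = [r for r in results if r["tf_raw"] == "1h"]
--     bullish = sum(r["bias"] == "Bullish" for r in htf)
--     bearish = sum(r["bias"] == "Bearish" for r in htf)
--
--     if bullish >= 1:
--         return "Bullish"
--     if bearish >= 1:
--         return "Bearish"
--     return "Neutral"
-- ===== SOURCE B (Python) =====
-- TREND = ("Neutral", "Bearish", "Bullish")
-- SCORE = {"Bullish": 2, "Bearish": 1}
--
-- def classify_trend(results):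
--     best = 0
--     for r in results:
--         if r["tf_raw"] == "1h":
--             best = max(best, SCORE.get(r["bias"], 0))
--     return TREND[best]
-- ===== Notes on version B (the rewrite author's own statement) =====
-- stated objective: alternative
-- what changed: Replaces the filtered list plus two counting passes and a branch chain with a numeric severity ranking: each 1h row is scored via a table (Bullish=2, Bearish=1), the scores are max-reduced in one pass, and the answer is read out of a trend table indexed by the maximum.
import Mathlib
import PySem

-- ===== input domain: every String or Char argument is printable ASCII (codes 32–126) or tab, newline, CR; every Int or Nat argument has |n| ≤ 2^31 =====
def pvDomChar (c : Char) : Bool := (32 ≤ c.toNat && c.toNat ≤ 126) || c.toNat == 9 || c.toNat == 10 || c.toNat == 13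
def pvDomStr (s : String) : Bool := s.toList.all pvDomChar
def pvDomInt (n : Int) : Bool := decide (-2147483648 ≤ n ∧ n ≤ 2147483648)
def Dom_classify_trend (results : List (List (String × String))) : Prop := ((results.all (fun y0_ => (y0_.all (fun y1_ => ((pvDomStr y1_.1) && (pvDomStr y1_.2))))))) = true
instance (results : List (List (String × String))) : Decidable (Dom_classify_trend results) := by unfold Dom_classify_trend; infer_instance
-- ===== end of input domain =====

-- B replaces filter + two counts + branch chain with a numeric severity ranking:
-- score each row from a table, max-reduce in one pass, index a trend table
-- (objective: alternative decomposition, same O(n) cost).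

-- first-match association-list lookup, = Python d[k] when the key is present
-- (Pre_ guarantees that); returns "" where Python would raise KeyError.
def pvLookup (r : List (String × String)) (k : String) : String :=
  ((r.find? (fun kv => kv.1 == k)).map (fun kv => kv.2)).getD ""

-- ===== PORT A =====
-- r["k"] is ported as pvLookup; Pre_ guarantees the key is present wherever
-- A dereferences it, so the "" default is never taken on Pre_.
def classify_trend (results : List (List (String × String))) : String :=
  let htf := results.filter (fun r => pvLookup r "tf_raw" == "1h")
  let bullish := htf.foldl (fun acc r => acc + (if pvLookup r "bias" == "Bullish" then (1 : Int) else 0)) 0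
  let bearish := htf.foldl (fun acc r => acc + (if pvLookup r "bias" == "Bearish" then (1 : Int) else 0)) 0
  if bullish ≥ 1 then "Bullish"
  else if bearish ≥ 1 then "Bearish"
  else "Neutral"

-- ===== PORT B =====
def pvTREND : List String := ["Neutral", "Bearish", "Bullish"]
def pvSCORE : List (String × Int) := [("Bullish", 2), ("Bearish", 1)]

-- Python SCORE.get(k, dflt): first-match association-list lookup with default
def pvGetD (d : List (String × Int)) (k : String) (dflt : Int) : Int :=
  ((d.find? (fun kv => kv.1 == k)).map (fun kv => kv.2)).getD dflt

def classify_trend_alt (results : List (List (String × String))) : String :=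
  let best := results.foldl (fun (best : Int) r =>
    if pvLookup r "tf_raw" == "1h" then
      max best (pvGetD pvSCORE (pvLookup r "bias") 0)
    else best) 0
  (PySem.List.pyGet? pvTREND best).getD ""

-- ===== PRECONDITION & SPEC =====
-- Pre_ excludes inputs where the Python A raises KeyError: every entry must
-- carry "tf_raw", and entries whose tf_raw is "1h" must carry "bias".
def Pre_classify_trend (results : List (List (String × String))) : Prop :=
  ∀ r ∈ results, (r.find? (fun kv => kv.1 == "tf_raw")).isSome = true ∧
    (pvLookup r "tf_raw" = "1h" → (r.find? (fun kv => kv.1 == "bias")).isSome = true)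
instance (results : List (List (String × String))) : Decidable (Pre_classify_trend results) := by unfold Pre_classify_trend; infer_instance
def pvWitness_classify_trend : (List (List (String × String))) :=
  [[("tf_raw", "1h"), ("bias", "Bullish")], [("tf_raw", "15m")]]
def Spec_classify_trend (results : List (List (String × String))) (out : String) : Prop := out = classify_trend_alt results
instance (results : List (List (String × String))) (out : String) : Decidable (Spec_classify_trend results out) := by unfold Spec_classify_trend; infer_instance

-- ===== CLAIM (what is proved, stated in full; the proofs are below) =====
def Claim_equal_classify_trend : Prop := ∀ (results : List (List (String × String))), Dom_classify_trend results → Pre_classify_trend results → Spec_classify_trend results (classify_trend results)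

-- ===== LEMMAS AND PROOFS =====

def pvIsBull (r : List (String × String)) : Bool :=
  pvLookup r "tf_raw" == "1h" && pvLookup r "bias" == "Bullish"
def pvIsBear (r : List (String × String)) : Bool :=
  pvLookup r "tf_raw" == "1h" && pvLookup r "bias" == "Bearish"

-- the maximum severity over the whole list, as determined by the two any-flags
def pvM (l : List (List (String × String))) : Int :=
  if l.any pvIsBull then 2 else if l.any pvIsBear then 1 else 0

-- B's max-fold yields max of the initial value and the list's severity maximum.
theorem pvM_bounds (l : List (List (String × String))) : 0 ≤ pvM l ∧ pvM l ≤ 2 := by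
  unfold pvM; split_ifs <;> omega

theorem alt_fold_eq (l : List (List (String × String))) (s : Int) (hs : 0 ≤ s) :
    l.foldl (fun (best : Int) r =>
      if pvLookup r "tf_raw" == "1h" then
        max best (pvGetD pvSCORE (pvLookup r "bias") 0)
      else best) s = max s (pvM l) := by
  induction l generalizing s with
  | nil =>
    simp only [List.foldl_nil, pvM, List.any_nil, if_neg Bool.false_ne_true]
    omega
  | cons r t ih =>
    simp only [List.foldl_cons]
    have hM := pvM_bounds t
    by_cases h1 : pvLookup r "tf_raw" = "1h"
    · rw [if_pos (by simp [h1]), ih _ (le_trans hs (le_max_left _ _))]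
      by_cases h2 : pvLookup r "bias" = "Bullish"
      · have : pvM (r :: t) = 2 := by
          simp [pvM, List.any_cons, pvIsBull, h1, h2]
        rw [this]
        have hg : pvGetD pvSCORE (pvLookup r "bias") 0 = 2 := by rw [h2]; decide
        rw [hg]; omega
      · by_cases h3 : pvLookup r "bias" = "Bearish"
        · have hM' : pvM (r :: t) = if t.any pvIsBull then 2 else 1 := by
            simp [pvM, List.any_cons, pvIsBull, pvIsBear, h1, h2, h3]
          rw [hM']
          have : pvGetD pvSCORE (pvLookup r "bias") 0 = 1 := by rw [h3]; decide
          rw [this]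
          have hMt : pvM t = if t.any pvIsBull then 2 else if t.any pvIsBear then 1 else 0 := rfl
          rw [hMt]; split_ifs <;> omega
        · have hM' : pvM (r :: t) = pvM t := by
            simp [pvM, List.any_cons, pvIsBull, pvIsBear, h1, h2, h3]
          rw [hM']
          have : pvGetD pvSCORE (pvLookup r "bias") 0 = 0 := by
            have e2 : ("Bullish" == pvLookup r "bias") = false :=
              beq_eq_false_iff_ne.mpr (fun h => h2 h.symm)
            have e3 : ("Bearish" == pvLookup r "bias") = false :=
              beq_eq_false_iff_ne.mpr (fun h => h3 h.symm)
            simp [pvSCORE, pvGetD, List.find?, e2, e3]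
          rw [this]; omega
    · rw [if_neg (by simp [h1]), ih _ hs]
      have hM' : pvM (r :: t) = pvM t := by
        simp [pvM, List.any_cons, pvIsBull, pvIsBear, h1]
      rw [hM']

-- A's counting fold equals the initial value plus the countP.
theorem count_fold_eq (p : List (String × String) → Bool)
    (l : List (List (String × String))) (a : Int) :
    l.foldl (fun acc r => acc + (if p r then (1 : Int) else 0)) a
      = a + (l.countP p : Int) := by
  induction l generalizing a with
  | nil => simp
  | cons r t ih =>
    simp only [List.foldl_cons, ih, List.countP_cons]
    by_cases h : p r <;> simp [h] <;> push_cast <;> ring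

theorem countP_filter_and (p q : List (String × String) → Bool)
    (l : List (List (String × String))) :
    (l.filter q).countP p = l.countP (fun r => q r && p r) := by
  induction l with
  | nil => rfl
  | cons r t ih =>
    by_cases hq : q r
    · by_cases hp : p r <;> simp [List.filter_cons, List.countP_cons, hq, hp, ih]
    · simp [List.filter_cons, List.countP_cons, hq, ih]

theorem any_iff_countP_pos (p : List (String × String) → Bool)
    (l : List (List (String × String))) :
    l.any p = true ↔ (1 : Int) ≤ (l.countP p : Int) := by
  rw [List.any_eq_true]
  have := List.countP_pos_iff (p := p) (l := l)
  constructor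
  · intro h
    have := this.mpr h
    omega
  · intro h
    exact this.mp (by omega)

-- ===== VERDICT (by name: the statement is the Claim_ definition above) =====
theorem classify_trend_spec : Claim_equal_classify_trend := by
  intro results _ _
  show classify_trend results = classify_trend_alt results
  unfold classify_trend classify_trend_alt
  simp only [alt_fold_eq _ _ le_rfl, count_fold_eq, countP_filter_and]
  have hbull := any_iff_countP_pos (fun r => pvLookup r "tf_raw" == "1h" && pvLookup r "bias" == "Bullish") results
  have hbear := any_iff_countP_pos (fun r => pvLookup r "tf_raw" == "1h" && pvLookup r "bias" == "Bearish") results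
  by_cases h1 : results.any pvIsBull = true
  · have := hbull.mp (by simpa [pvIsBull] using h1)
    simp [pvM, h1, this, PySem.List.pyIdx?, PySem.List.pyGet?, pvTREND]
  · have h1' : ¬ (1 : Int) ≤ (results.countP (fun r => pvLookup r "tf_raw" == "1h" && pvLookup r "bias" == "Bullish") : Int) := by
      intro h; exact h1 (by simpa [pvIsBull] using hbull.mpr h)
    by_cases h2 : results.any pvIsBear = true
    · have := hbear.mp (by simpa [pvIsBear] using h2)
      simp [pvM, h1, h2, h1', this, PySem.List.pyIdx?, PySem.List.pyGet?, pvTREND]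
    · have h2' : ¬ (1 : Int) ≤ (results.countP (fun r => pvLookup r "tf_raw" == "1h" && pvLookup r "bias" == "Bearish") : Int) := by
        intro h; exact h2 (by simpa [pvIsBear] using hbear.mpr h)
      simp [pvM, h1, h2, h1', h2', PySem.List.pyIdx?, PySem.List.pyGet?, pvTREND]
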